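-- pv_equiv track=rewrite | github.com/MrKirlew/TheePhone | backend/enhanced_intent_detector.py | get_priority_order
-- ===== SOURCE A (Python) =====
-- from typing import Dict, List, Optional, Any
--
-- def get_priority_order(apis: Dict[str, List[str]]) -> List[tuple]:
--     """Get prioritized list of API actions to execute"""
--     priorities = []
--
--     # Define priority levels for different APIs
--     priority_levels = {
--         'calendar': 10,  # Highest priority for time-sensitive info
--         'email': 9,      # High priority for communication
--         'weather': 8,    # High priority for current info
--         'geolocation': 7, # Medium-high priority for context
--         'drive': 6,      # Medium priority for files
--         'speech': 5,     # Medium priority for voice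
--         'texttospeech': 4, # Medium priority for responses
--         'vision': 3,     # Medium priority for images
--         'firebase_messaging': 7, # High priority for notifications
--         'cloud_logging': 2, # Low priority for monitoring
--         'cloud_monitoring': 2 # Low priority for monitoring
--     }
--
--     # Add all API actions with their priorities
--     for api_name, actions in apis.items():
--         priority = priority_levels.get(api_name, 1)  # Default low priority
--         for action in actions:
--             priorities.append((api_name, action, priority))
--
--     # Sort by priority (highest first)
--     priorities.sort(key=lambda x: x[2], reverse=True)
--     return priorities
-- ===== SOURCE B (Python) =====
-- def get_priority_order(apis):
--     """Get prioritized list of API actions to execute"""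
--     priority_levels = {
--         'calendar': 10,
--         'email': 9,
--         'weather': 8,
--         'geolocation': 7,
--         'drive': 6,
--         'speech': 5,
--         'texttospeech': 4,
--         'vision': 3,
--         'firebase_messaging': 7,
--         'cloud_logging': 2,
--         'cloud_monitoring': 2
--     }
--     result = []
--     # Bucket pass: priorities are always in 1..10, so emit levels high-to-low
--     # directly, preserving insertion order inside each level (= stable reverse sort).
--     for level in range(10, 0, -1):
--         for api_name, actions in apis.items():
--             if priority_levels.get(api_name, 1) == level:
--                 for action in actions:
--                     result.append((api_name, action, level))
--     return result
-- ===== Notes on version B (the rewrite author's own statement) =====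
-- stated objective: alternative
-- what changed: Replaces build-then-stable-reverse-sort with a bucket/counting pass: iterate the fixed priority levels 10 down to 1 and emit each API's actions at its level in insertion order, so no comparison sort is performed.
import Mathlib
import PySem

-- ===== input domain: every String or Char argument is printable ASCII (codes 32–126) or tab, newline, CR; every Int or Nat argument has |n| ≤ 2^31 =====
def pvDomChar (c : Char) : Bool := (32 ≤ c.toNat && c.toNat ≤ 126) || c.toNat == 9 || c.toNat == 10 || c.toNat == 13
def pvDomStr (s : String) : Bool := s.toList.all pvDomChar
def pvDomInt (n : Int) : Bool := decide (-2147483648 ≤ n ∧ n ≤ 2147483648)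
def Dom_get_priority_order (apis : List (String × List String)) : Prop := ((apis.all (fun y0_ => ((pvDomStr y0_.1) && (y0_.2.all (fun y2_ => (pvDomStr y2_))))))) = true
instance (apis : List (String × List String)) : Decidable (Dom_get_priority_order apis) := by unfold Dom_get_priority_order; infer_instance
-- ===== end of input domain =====

-- B replaces the build-then-stable-reverse-sort with a fixed 10-level bucket pass (alternative decomposition, same results).

-- shared literal from both sources: the priority_levels dict and its .get(name, 1) lookup
def priorityLevels : PySem.Dict String Int :=
  PySem.Dict.mk [("calendar", 10), ("email", 9), ("weather", 8), ("geolocation", 7),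
    ("drive", 6), ("speech", 5), ("texttospeech", 4), ("vision", 3),
    ("firebase_messaging", 7), ("cloud_logging", 2), ("cloud_monitoring", 2)]

def prioOf (name : String) : Int := PySem.Dict.getD priorityLevels name 1

-- ===== PORT A =====
def get_priority_order (apis : List (String × List String)) : List (String × String × Int) :=
  let priorities : List (String × String × Int) :=
    apis.foldl (fun acc x =>
      let priority := prioOf x.1
      x.2.foldl (fun acc2 action => acc2 ++ [(x.1, action, priority)]) acc) []
  PySem.List.sorted priorities (fun t => t.2.2) true

-- ===== PORT B =====
def get_priority_order_alt (apis : List (String × List String)) : List (String × String × Int) :=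
  (PySem.List.pyRange 10 0 (-1)).foldl (fun result level =>
    apis.foldl (fun r x =>
      if prioOf x.1 == level then
        x.2.foldl (fun r2 action => r2 ++ [(x.1, action, level)]) r
      else r) result) []

-- ===== PRECONDITION & SPEC =====
def Spec_get_priority_order (apis : List (String × List String)) (out : List (String × String × Int)) : Prop := out = get_priority_order_alt apis
instance (apis : List (String × List String)) (out : List (String × String × Int)) : Decidable (Spec_get_priority_order apis out) := by unfold Spec_get_priority_order; infer_instance

-- ===== CLAIM (what is proved, stated in full; the proofs are below) =====
def Claim_equal_get_priority_order : Prop := ∀ (apis : List (String × List String)), Dom_get_priority_order apis → Spec_get_priority_order apis (get_priority_order apis)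

-- ===== LEMMAS AND PROOFS =====

-- prioOf always lands in 1..10
set_option maxHeartbeats 1000000 in
theorem prioOf_mem (s : String) : prioOf s ∈ ([10, 9, 8, 7, 6, 5, 4, 3, 2, 1] : List Int) := by
  simp only [prioOf, priorityLevels, PySem.Dict.getD, PySem.Dict.get?_mk_cons]
  split_ifs <;> simp [PySem.Dict.get?]

theorem insertBy_append_left {α : Type} (before : α → α → Bool) (x : α) (zs ws : List α)
    (h : ∀ z ∈ zs, before x z = false) :
    PySem.List.insertBy before x (zs ++ ws) = zs ++ PySem.List.insertBy before x ws := by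
  induction zs with
  | nil => simp
  | cons z zt ih =>
      have hz : before x z = false := h z (by simp)
      simp only [List.cons_append, PySem.List.insertBy, hz]
      simp [ih (fun a ha => h a (by simp [ha]))]

theorem insertBy_all_before {α : Type} (before : α → α → Bool) (x : α) (ws : List α)
    (h : ∀ y ∈ ws, before x y = true) :
    PySem.List.insertBy before x ws = x :: ws := by
  cases ws with
  | nil => rfl
  | cons w wt => simp [PySem.List.insertBy, h w (by simp)]

-- inserting x into the descending bucket concatenation appends x to its own bucket
theorem insertBy_buckets {α : Type} (k : α → Int) (x : α) (m : List α) :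
    ∀ (ps : List Int), ps.Pairwise (· > ·) → k x ∈ ps →
    PySem.List.insertBy (fun a b => decide (k b < k a)) x
        (ps.flatMap (fun p => m.filter (fun y => k y == p)))
      = ps.flatMap (fun p => m.filter (fun y => k y == p) ++ (if k x == p then [x] else [])) := by
  intro ps
  induction ps with
  | nil => intro _ h; simp at h
  | cons p pt ih =>
      intro hpw hmem
      have hpw' := (List.pairwise_cons.mp hpw).2
      have hgt := (List.pairwise_cons.mp hpw).1
      have hbucket : ∀ z ∈ m.filter (fun y => k y == p), (fun a b => decide (k b < k a)) x z = false := by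
        intro z hz
        have hz' : k z = p := by simpa using (List.of_mem_filter hz)
        rcases List.mem_cons.mp hmem with hkx | hkx
        · simp [hz', hkx]
        · have : k x < p := hgt _ hkx
          simp [hz']; omega
      by_cases hx : k x = p
      · have hrest : ∀ y ∈ pt.flatMap (fun p => m.filter (fun z => k z == p)),
            (fun a b => decide (k b < k a)) x y = true := by
          intro y hy
          simp only [List.mem_flatMap] at hy
          rcases hy with ⟨q, hq, hyq⟩
          have hy' : k y = q := by simpa using (List.of_mem_filter hyq)
          have : q < p := hgt _ hq
          simp [hy', hx]; omega
        have hothers : ∀ q ∈ pt, (if k x == q then [x] else ([] : List α)) = [] := by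
          intro q hq
          have : q < p := hgt _ hq
          simp [hx]; omega
        have hrw : List.flatMap
              (fun q => List.filter (fun y => k y == q) m ++ if (k x == q) = true then [x] else []) pt
            = List.flatMap (fun q => List.filter (fun y => k y == q) m) pt :=
          List.flatMap_congr (fun q hq => by rw [hothers q hq, List.append_nil])
        simp only [List.flatMap_cons]
        rw [insertBy_append_left _ _ _ _ hbucket, insertBy_all_before _ _ _ hrest, hrw]
        simp [hx]
      · have hmem' : k x ∈ pt := by
          rcases List.mem_cons.mp hmem with h | h
          · exact absurd h hx
          · exact h
        simp only [List.flatMap_cons]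
        rw [insertBy_append_left _ _ _ _ hbucket, ih hpw' hmem']
        have hnil : (if k x == p then [x] else ([] : List α)) = [] := by simp [hx]
        rw [hnil, List.append_nil]

-- sorted with reverse=True over keys drawn from a strictly descending level list is the bucket concatenation
theorem sorted_rev_eq_buckets {α : Type} (k : α → Int) (ps : List Int)
    (hpw : ps.Pairwise (· > ·)) :
    ∀ (l : List α), (∀ x ∈ l, k x ∈ ps) →
    PySem.List.sorted l k true = ps.flatMap (fun p => l.filter (fun y => k y == p)) := by
  intro l
  induction l using List.reverseRecOn with
  | nil => intro _; simp [PySem.List.sorted]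
  | append_singleton l' x ih =>
      intro hall
      have hall' : ∀ y ∈ l', k y ∈ ps := fun y hy => hall y (by simp [hy])
      rw [PySem.List.sorted_rev_eq_foldl_insertBy, List.foldl_append]
      simp only [List.foldl_cons, List.foldl_nil]
      rw [← PySem.List.sorted_rev_eq_foldl_insertBy, ih hall']
      rw [insertBy_buckets k x l' ps hpw (hall x (by simp))]
      apply List.flatMap_congr
      intro p _
      rw [List.filter_append]
      congr 1
      by_cases h : k x = p <;> simp [h]

-- A's accumulation loop builds the flatMap of entries
theorem entries_eq_gen (apis : List (String × List String)) :
    ∀ (acc : List (String × String × Int)),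
    (apis.foldl (fun acc x =>
      x.2.foldl (fun acc2 action => acc2 ++ [(x.1, action, prioOf x.1)]) acc) acc)
    = acc ++ apis.flatMap (fun x => x.2.map (fun a => (x.1, a, prioOf x.1))) := by
  induction apis with
  | nil => simp
  | cons x xt ih =>
      intro acc
      simp only [List.foldl_cons, List.flatMap_cons]
      rw [PySem.List.foldl_append_singleton_eq_map, ih, List.append_assoc]

theorem entries_eq (apis : List (String × List String)) :
    (apis.foldl (fun acc x =>
      x.2.foldl (fun acc2 action => acc2 ++ [(x.1, action, prioOf x.1)]) acc) [])
    = apis.flatMap (fun x => x.2.map (fun a => (x.1, a, prioOf x.1))) := by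
  rw [entries_eq_gen]; simp

-- the per-level inner pass of B, as append of a flatMap
theorem inner_pass_eq (apis : List (String × List String)) (p : Int) (r : List (String × String × Int)) :
    apis.foldl (fun r x =>
      if prioOf x.1 == p then x.2.foldl (fun r2 action => r2 ++ [(x.1, action, p)]) r else r) r
    = r ++ apis.flatMap (fun x => if prioOf x.1 == p then x.2.map (fun a => (x.1, a, p)) else []) := by
  induction apis generalizing r with
  | nil => simp
  | cons x xt ih =>
      simp only [List.foldl_cons, List.flatMap_cons]
      by_cases h : prioOf x.1 = p
      · simp only [h, beq_self_eq_true, if_true]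
        rw [PySem.List.foldl_append_singleton_eq_map, ih]
        simp
      · have hb : (prioOf x.1 == p) = false := by simp [h]
        simp only [hb]
        rw [ih]
        simp

-- the per-level flatMap over apis equals filtering the entry list by that level
theorem level_filter_eq (apis : List (String × List String)) (p : Int) :
    apis.flatMap (fun x => if prioOf x.1 == p then x.2.map (fun a => (x.1, a, p)) else [])
    = (apis.flatMap (fun x => x.2.map (fun a => (x.1, a, prioOf x.1)))).filter
        (fun t => t.2.2 == p) := by
  induction apis with
  | nil => simp
  | cons x xt ih =>
      simp only [List.flatMap_cons, List.filter_append, ih]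
      congr 1
      by_cases h : prioOf x.1 = p
      · simp [h, List.filter_map, Function.comp_def]
      · have hb : (prioOf x.1 == p) = false := by simp [h]
        simp [hb, List.filter_map, Function.comp_def]

-- ===== VERDICT (by name: the statement is the Claim_ definition above) =====
theorem get_priority_order_spec : Claim_equal_get_priority_order := by
  intro apis _
  unfold Spec_get_priority_order get_priority_order get_priority_order_alt
  have hps : (PySem.List.pyRange 10 0 (-1)) = ([10, 9, 8, 7, 6, 5, 4, 3, 2, 1] : List Int) := by decide
  rw [entries_eq, hps]
  set entries := apis.flatMap (fun x => x.2.map (fun a => (x.1, a, prioOf x.1))) with hent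
  have hall : ∀ t ∈ entries, t.2.2 ∈ ([10, 9, 8, 7, 6, 5, 4, 3, 2, 1] : List Int) := by
    intro t ht
    rw [hent] at ht
    simp only [List.mem_flatMap, List.mem_map] at ht
    rcases ht with ⟨x, _, a, _, rfl⟩
    exact prioOf_mem x.1
  rw [sorted_rev_eq_buckets (fun t => t.2.2) _ (by decide) entries hall]
  have : ∀ (init : List (String × String × Int)) (ls : List Int),
      ls.foldl (fun result level =>
        apis.foldl (fun r x =>
          if prioOf x.1 == level then x.2.foldl (fun r2 action => r2 ++ [(x.1, action, level)]) r else r) result) init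
      = init ++ ls.flatMap (fun p => entries.filter (fun t => t.2.2 == p)) := by
    intro init ls
    induction ls generalizing init with
    | nil => simp
    | cons p pt ihp =>
        simp only [List.foldl_cons, List.flatMap_cons]
        rw [inner_pass_eq, ihp, level_filter_eq, hent, List.append_assoc]
  rw [this]
  simp
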